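-- pv_equiv track=rewrite | github.com/GENAIGroupProject/TravelItineraryPlanner_GENAI_Project | app.py | scheduler_agent
-- ===== SOURCE A (Python) =====
-- from typing import List, Dict, Optional
--
-- def scheduler_agent(attractions: List[dict], days: int) -> Dict:
--     """
--     Simple scheduling: distribute attractions across days and timeslots.
--     We ignore real distances and just do round-robin for trial.
--     """
--     slots = ["morning", "afternoon", "evening"]
--     itinerary = {f"day{i+1}": {s: [] for s in slots} for i in range(days)}
--
--     i = 0
--     for a in attractions:
--         day_idx = i // len(slots)
--         slot_idx = i % len(slots)
--         if day_idx >= days: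
--             break
--         day_key = f"day{day_idx+1}"
--         itinerary[day_key][slots[slot_idx]].append(a)
--         i += 1
--
--     return itinerary
-- ===== SOURCE B (Python) =====
-- def scheduler_agent(attractions, days):
--     """Build the itinerary day-by-day, consuming the attractions through an
--     iterator, instead of pre-allocating an empty grid and filling it with
--     index arithmetic (i//3, i%3) as A does."""
--     slots = ["morning", "afternoon", "evening"]
--     it = iter(attractions)
--     _SENTINEL = object()
--     itinerary = {}
--     for d in range(days):
--         day_plan = {}
--         for s in slots:
--             a = next(it, _SENTINEL)
--             day_plan[s] = [] if a is _SENTINEL else [a]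
--         itinerary[f"day{d+1}"] = day_plan
--     return itinerary
-- ===== Notes on version B (the rewrite author's own statement) =====
-- stated objective: simpler
-- what changed: B builds the itinerary day-by-day while consuming the attractions through an iterator, instead of pre-allocating an empty grid and filling it in a flat pass with i//3 / i%3 index arithmetic and a break guard.
import Mathlib
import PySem

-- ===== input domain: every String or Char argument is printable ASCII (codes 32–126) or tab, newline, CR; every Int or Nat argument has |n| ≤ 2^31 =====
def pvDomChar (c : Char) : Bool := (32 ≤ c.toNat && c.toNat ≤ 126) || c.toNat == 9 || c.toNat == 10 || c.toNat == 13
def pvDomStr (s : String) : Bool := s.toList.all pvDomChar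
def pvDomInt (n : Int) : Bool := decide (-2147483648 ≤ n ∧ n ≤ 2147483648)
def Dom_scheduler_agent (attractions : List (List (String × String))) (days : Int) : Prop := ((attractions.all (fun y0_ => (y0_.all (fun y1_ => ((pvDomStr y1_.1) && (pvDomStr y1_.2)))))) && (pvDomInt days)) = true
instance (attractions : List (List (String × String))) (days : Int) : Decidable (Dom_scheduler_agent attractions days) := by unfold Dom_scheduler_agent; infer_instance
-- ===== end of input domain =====

-- B builds the itinerary day-by-day while consuming the attractions through an iterator, instead of
-- pre-allocating an empty grid and filling it with i//3 / i%3 index arithmetic (objective: simpler).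

-- ===== PORT A =====
def pvSlotsA : List String := ["morning", "afternoon", "evening"]

-- Python's in-place `itinerary[k][s].append(a)`: update the value at the first matching key.
-- (A only ever updates keys that are present, so the missing-key case is never reached.)
def pvModList {α : Type} (xs : List (String × α)) (k : String) (f : α → α) : List (String × α) :=
  match xs with
  | [] => []
  | (k', v) :: rest => if k' == k then (k', f v) :: rest else (k', v) :: pvModList rest k f

-- the `for a in attractions` loop of A, with its running index i and the break on day_idx >= days
def pvALoop (days : Int) (itin : List (String × List (String × List (List (String × String))))) (i : Int)
    (as : List (List (String × String))) : List (String × List (String × List (List (String × String)))) :=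
  match as with
  | [] => itin
  | a :: rest =>
    let day_idx := PySem.Int.floordiv i (PySem.List.len pvSlotsA)
    let slot_idx := PySem.Int.mod i (PySem.List.len pvSlotsA)
    if day_idx ≥ days then itin
    else
      -- slots[slot_idx]: slot_idx = i % 3 is always in range (i ≥ 0), so pyGetD's default is never used
      pvALoop days
        (pvModList itin ("day" ++ PySem.Int.toStr (day_idx + 1))
          (fun dp => pvModList dp (PySem.List.pyGetD pvSlotsA slot_idx "") (· ++ [a])))
        (i + 1) rest

def scheduler_agent (attractions : List (List (String × String))) (days : Int) :
    List (String × List (String × List (List (String × String)))) :=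
  -- the dict comprehension {f"day{i+1}": {s: [] for s in slots} for i in range(days)}: keys are
  -- distinct, so the insertion-ordered dict is exactly this map
  let itinerary := (PySem.List.pyRange 0 days 1).map
    (fun i => ("day" ++ PySem.Int.toStr (i + 1),
               pvSlotsA.map (fun s => (s, ([] : List (List (String × String)))))))
  pvALoop days itinerary 0 attractions

-- ===== PORT B =====
def pvSlotsB : List String := ["morning", "afternoon", "evening"]

-- next(it, SENTINEL) on the iterator's remaining elements
def pvPull {α : Type} (rem : List α) : Option α × List α :=
  match rem with
  | [] => (none, [])
  | a :: r => (some a, r)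

-- the inner `for s in slots` loop: build one day's plan, consuming the iterator
def pvBDay (rem : List (List (String × String))) :
    List (String × List (List (String × String))) × List (List (String × String)) :=
  pvSlotsB.foldl
    (fun st s =>
      let p := pvPull st.2
      (st.1 ++ [(s, match p.1 with | none => [] | some a => [a])], p.2))
    ([], rem)

-- the outer `for d in range(days)` loop building the itinerary (fresh keys, so dict insert = append)
def pvBFill (rem : List (List (String × String))) (ds : List Int) :
    List (String × List (String × List (List (String × String)))) :=
  match ds with
  | [] => []
  | d :: ds' =>
    let st := pvBDay rem
    ("day" ++ PySem.Int.toStr (d + 1), st.1) :: pvBFill st.2 ds'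

def scheduler_agent_alt (attractions : List (List (String × String))) (days : Int) :
    List (String × List (String × List (List (String × String)))) :=
  pvBFill attractions (PySem.List.pyRange 0 days 1)

-- ===== PRECONDITION & SPEC =====
def Spec_scheduler_agent (attractions : List (List (String × String))) (days : Int) (out : List (String × List (String × List (List (String × String))))) : Prop := out = scheduler_agent_alt attractions days
instance (attractions : List (List (String × String))) (days : Int) (out : List (String × List (String × List (List (String × String))))) : Decidable (Spec_scheduler_agent attractions days out) := by
  unfold Spec_scheduler_agent
  haveI h1 : DecidableEq (List (List (String × String))) := inferInstance
  haveI h2 : DecidableEq (String × List (List (String × String))) := inferInstance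
  haveI h3 : DecidableEq (List (String × List (List (String × String)))) := inferInstance
  haveI h4 : DecidableEq (String × List (String × List (List (String × String)))) := inferInstance
  infer_instance

-- ===== CLAIM (what is proved, stated in full; the proofs are below) =====
def Claim_equal_scheduler_agent : Prop := ∀ (attractions : List (List (String × String))) (days : Int), Dom_scheduler_agent attractions days → Spec_scheduler_agent attractions days (scheduler_agent attractions days)

-- ===== LEMMAS AND PROOFS =====

-- ---- str(n) is injective on nonnegative integers (needed: the "day{d}" keys are pairwise distinct) ----
def pvDig (n : Nat) : List Char :=
  if _h : n < 10 then [Nat.digitChar n]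
  else pvDig (n / 10) ++ [Nat.digitChar (n % 10)]
decreasing_by exact Nat.div_lt_self (by omega) (by omega)

theorem pvDig_lt {n : Nat} (h : n < 10) : pvDig n = [Nat.digitChar n] := by
  rw [pvDig, dif_pos h]

theorem pvDig_ge {n : Nat} (h : ¬ n < 10) : pvDig n = pvDig (n / 10) ++ [Nat.digitChar (n % 10)] := by
  conv_lhs => rw [pvDig]
  rw [dif_neg h]

theorem pvDig_ne_nil (n : Nat) : pvDig n ≠ [] := by
  by_cases h : n < 10
  · rw [pvDig_lt h]; simp
  · rw [pvDig_ge h]; simp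

theorem pvToDigitsCore_eq : ∀ (f n : Nat) (acc : List Char), n < f →
    Nat.toDigitsCore 10 f n acc = pvDig n ++ acc := by
  intro f
  induction f with
  | zero => intro n acc h; omega
  | succ f ih =>
    intro n acc h
    rw [Nat.toDigitsCore]
    by_cases h10 : n < 10
    · have hz : n / 10 = 0 := Nat.div_eq_of_lt h10
      simp [hz, pvDig_lt h10, Nat.mod_eq_of_lt h10]
    · have hne : ¬ n / 10 = 0 := by
        intro hz; exact h10 (by omega : n < 10)
      simp only [hne, if_false]
      rw [ih (n / 10) _ (by omega), pvDig_ge h10]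
      simp

theorem pvDigitChar_inj (a b : Nat) (ha : a < 10) (hb : b < 10)
    (h : Nat.digitChar a = Nat.digitChar b) : a = b := by
  have key : ∀ x y : Fin 10, Nat.digitChar x.val = Nat.digitChar y.val → x = y := by decide
  have := key ⟨a, ha⟩ ⟨b, hb⟩ h
  simpa [Fin.ext_iff] using this

theorem pvDig_inj : ∀ m n : Nat, pvDig m = pvDig n → m = n := by
  intro m
  induction m using Nat.strong_induction_on with
  | _ m ih =>
    intro n h
    by_cases hm : m < 10 <;> by_cases hn : n < 10
    · rw [pvDig_lt hm, pvDig_lt hn] at h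
      simp at h
      exact pvDigitChar_inj m n hm hn h
    · rw [pvDig_lt hm, pvDig_ge hn] at h
      cases hc : pvDig (n / 10) with
      | nil => exact absurd hc (pvDig_ne_nil _)
      | cons x xs => rw [hc] at h; simp at h
    · rw [pvDig_ge hm, pvDig_lt hn] at h
      cases hc : pvDig (m / 10) with
      | nil => exact absurd hc (pvDig_ne_nil _)
      | cons x xs => rw [hc] at h; simp at h
    · rw [pvDig_ge hm, pvDig_ge hn] at h
      obtain ⟨h3, h4⟩ := List.append_inj' h (by simp)
      have hdiv : m / 10 = n / 10 := ih (m / 10) (Nat.div_lt_self (by omega) (by omega)) _ h3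
      simp at h4
      have hmod : m % 10 = n % 10 :=
        pvDigitChar_inj _ _ (Nat.mod_lt _ (by omega)) (Nat.mod_lt _ (by omega)) h4
      omega

theorem pvToStr_inj (a b : Int) (ha : 0 ≤ a) (hb : 0 ≤ b)
    (h : PySem.Int.toStr a = PySem.Int.toStr b) : a = b := by
  unfold PySem.Int.toStr PySem.Int.toChars at h
  rw [if_neg (by omega), if_neg (by omega)] at h
  have h2 : Nat.toDigits 10 a.toNat = Nat.toDigits 10 b.toNat := by
    have := congrArg String.toList h
    simpa using this
  unfold Nat.toDigits at h2
  rw [pvToDigitsCore_eq _ _ _ (by omega), pvToDigitsCore_eq _ _ _ (by omega)] at h2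
  simp at h2
  have := pvDig_inj _ _ h2
  omega

theorem pvKey_ne (d e : Int) (hd : 0 ≤ d) (he : 0 ≤ e) (hne : d ≠ e) :
    ("day" ++ PySem.Int.toStr (d + 1)) ≠ ("day" ++ PySem.Int.toStr (e + 1)) := by
  intro h
  have h2 : PySem.Int.toStr (d + 1) = PySem.Int.toStr (e + 1) := by
    have h3 := congrArg String.toList h
    simp only [String.toList_append] at h3
    exact String.toList_injective (List.append_cancel_left h3)
  have := pvToStr_inj (d + 1) (e + 1) (by omega) (by omega) h2
  omega

-- ---- floor-division arithmetic (divisor 3 is positive, so fdiv/fmod = ediv/emod) ----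
theorem pvFdiv3 (a : Int) : PySem.Int.floordiv a 3 = a / 3 := by
  unfold PySem.Int.floordiv
  rw [Int.fdiv_eq_ediv]
  norm_num

theorem pvFmod3 (a : Int) : PySem.Int.mod a 3 = a % 3 := by
  unfold PySem.Int.mod
  rw [Int.fmod_eq_emod]
  norm_num

-- ---- one step of A's loop, with len(slots) computed and fdiv/fmod normalised ----
theorem pvALoop_cons (days : Int) (itin : List (String × List (String × List (List (String × String)))))
    (i : Int) (a : List (String × String)) (rest : List (List (String × String))) :
    pvALoop days itin i (a :: rest) =
      if days ≤ i / 3 then itin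
      else pvALoop days
        (pvModList itin ("day" ++ PySem.Int.toStr (i / 3 + 1))
          (fun dp => pvModList dp (PySem.List.pyGetD pvSlotsA (i % 3) "") (· ++ [a])))
        (i + 1) rest := by
  rw [pvALoop]
  have hlen : PySem.List.len pvSlotsA = 3 := by simp [pvSlotsA]
  simp only [hlen, pvFdiv3, pvFmod3, ge_iff_le]

-- ---- the empty day-plan and the empty-iterator fill ----
def pvEmptyDay (d : Int) : String × List (String × List (List (String × String))) :=
  ("day" ++ PySem.Int.toStr (d + 1), [("morning", []), ("afternoon", []), ("evening", [])])

theorem pvBFill_nil : ∀ ds : List Int, pvBFill [] ds = ds.map pvEmptyDay := by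
  intro ds
  induction ds with
  | nil => rfl
  | cons d ds' ih =>
    rw [pvBFill]
    simp only [List.map_cons]
    exact congrArg _ ih

-- ---- A's loop passes over an already-filled day (its key is never targeted again) ----
theorem pvALoop_skip : ∀ (as : List (List (String × String))) (days i e : Int)
    (hd : String × List (String × List (List (String × String))))
    (G : List (String × List (String × List (List (String × String))))),
    0 ≤ e → e < i / 3 → hd.1 = "day" ++ PySem.Int.toStr (e + 1) →
    pvALoop days (hd :: G) i as = hd :: pvALoop days G i as := by
  intro as
  induction as with
  | nil => intro days i e hd G _ _ _; rfl
  | cons a rest ih =>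
    intro days i e hd G he hlt hkey
    rw [pvALoop_cons, pvALoop_cons]
    by_cases hstop : days ≤ i / 3
    · rw [if_pos hstop, if_pos hstop]
    · rw [if_neg hstop, if_neg hstop]
      obtain ⟨k, v⟩ := hd
      simp only at hkey
      have hne : k ≠ "day" ++ PySem.Int.toStr (i / 3 + 1) := by
        rw [hkey]
        exact pvKey_ne e (i / 3) he (by omega) (by omega)
      rw [pvModList, if_neg (by simpa using hne)]
      exact ih days (i + 1) e (k, v) _ he (by omega) hkey

-- ---- the three literal slot updates inside one day ----
theorem pvMod_m (x y z : List (List (String × String))) (f : List (List (String × String)) → List (List (String × String))) :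
    pvModList [("morning", x), ("afternoon", y), ("evening", z)] "morning" f
      = [("morning", f x), ("afternoon", y), ("evening", z)] := by
  simp [pvModList]

theorem pvMod_a (x y z : List (List (String × String))) (f : List (List (String × String)) → List (List (String × String))) :
    pvModList [("morning", x), ("afternoon", y), ("evening", z)] "afternoon" f
      = [("morning", x), ("afternoon", f y), ("evening", z)] := by
  simp [pvModList]

theorem pvMod_e (x y z : List (List (String × String))) (f : List (List (String × String)) → List (List (String × String))) :
    pvModList [("morning", x), ("afternoon", y), ("evening", z)] "evening" f
      = [("morning", x), ("afternoon", y), ("evening", f z)] := by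
  simp [pvModList]

theorem pvModHead (k : String) (v : List (String × List (List (String × String))))
    (G : List (String × List (String × List (List (String × String)))))
    (f : List (String × List (List (String × String))) → List (String × List (List (String × String)))) :
    pvModList ((k, v) :: G) k f = (k, f v) :: G := by
  simp [pvModList]

theorem pvGetSlot0 : PySem.List.pyGetD pvSlotsA 0 "" = "morning" := by decide
theorem pvGetSlot1 : PySem.List.pyGetD pvSlotsA 1 "" = "afternoon" := by decide
theorem pvGetSlot2 : PySem.List.pyGetD pvSlotsA 2 "" = "evening" := by decide

-- ---- main induction: starting at day d with index i = 3d, A's loop equals B's day-by-day fill ----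
theorem pvMain : ∀ (k : Nat) (days d : Int) (rem : List (List (String × String))),
    0 ≤ d → (days - d).toNat = k →
    pvALoop days ((PySem.List.pyRange d days 1).map pvEmptyDay) (3 * d) rem
      = pvBFill rem (PySem.List.pyRange d days 1) := by
  intro k
  induction k with
  | zero =>
    intro days d rem hd hk
    have hle : days ≤ d := by omega
    rw [PySem.List.pyRange_one_eq_nil hle]
    cases rem with
    | nil => rfl
    | cons a rest =>
      rw [pvBFill, pvALoop_cons, if_pos (by omega : days ≤ 3 * d / 3)]
      rfl
  | succ k ih =>
    intro days d rem hd hk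
    have hlt : d < days := by omega
    rw [PySem.List.pyRange_one_cons hlt]
    have hdd : (3 : Int) * d / 3 = d := by omega
    have hG' : pvBFill [] (PySem.List.pyRange (d + 1) days 1)
        = (PySem.List.pyRange (d + 1) days 1).map pvEmptyDay := pvBFill_nil _
    match rem with
    | [] =>
      rw [pvALoop]
      rw [pvBFill]
      simp [pvBDay, pvSlotsB, pvPull, hG', pvEmptyDay]
    | [a] =>
      rw [pvALoop_cons, if_neg (by omega), hdd]
      have hm : (3 : Int) * d % 3 = 0 := by omega
      rw [hm, pvGetSlot0, List.map_cons, pvEmptyDay, pvModHead, pvMod_m]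
      rw [pvALoop]
      rw [pvBFill]
      simp [pvBDay, pvSlotsB, pvPull, hG']
    | [a, b] =>
      rw [pvALoop_cons, if_neg (by omega), hdd]
      have hm0 : (3 : Int) * d % 3 = 0 := by omega
      rw [hm0, pvGetSlot0, List.map_cons, pvEmptyDay, pvModHead, pvMod_m]
      rw [pvALoop_cons, if_neg (by omega : ¬ days ≤ (3 * d + 1) / 3)]
      have hd1 : (3 * d + 1) / 3 = d := by omega
      have hm1 : (3 * d + 1) % 3 = 1 := by omega
      rw [hd1, hm1, pvGetSlot1, pvModHead, pvMod_a]
      rw [pvALoop]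
      rw [pvBFill]
      simp [pvBDay, pvSlotsB, pvPull, hG']
    | a :: b :: c :: rem' =>
      rw [pvALoop_cons, if_neg (by omega), hdd]
      have hm0 : (3 : Int) * d % 3 = 0 := by omega
      rw [hm0, pvGetSlot0, List.map_cons, pvEmptyDay, pvModHead, pvMod_m]
      rw [pvALoop_cons, if_neg (by omega : ¬ days ≤ (3 * d + 1) / 3)]
      have hd1 : (3 * d + 1) / 3 = d := by omega
      have hm1 : (3 * d + 1) % 3 = 1 := by omega
      rw [hd1, hm1, pvGetSlot1, pvModHead, pvMod_a]
      rw [pvALoop_cons, if_neg (by omega : ¬ days ≤ (3 * d + 1 + 1) / 3)]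
      have hd2 : (3 * d + 1 + 1) / 3 = d := by omega
      have hm2 : (3 * d + 1 + 1) % 3 = 2 := by omega
      rw [hd2, hm2, pvGetSlot2, pvModHead, pvMod_e]
      rw [pvALoop_skip rem' days (3 * d + 1 + 1 + 1) d _ _ hd (by omega) rfl]
      have h33 : (3 : Int) * d + 1 + 1 + 1 = 3 * (d + 1) := by ring
      rw [h33, ih days (d + 1) rem' (by omega) (by omega)]
      rw [pvBFill]
      simp [pvBDay, pvSlotsB, pvPull]

-- ===== VERDICT (by name: the statement is the Claim_ definition above) =====
theorem scheduler_agent_spec : Claim_equal_scheduler_agent := by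
  intro attractions days _
  unfold Spec_scheduler_agent scheduler_agent scheduler_agent_alt
  have hmap : (fun i => ("day" ++ PySem.Int.toStr (i + 1),
      pvSlotsA.map (fun s => (s, ([] : List (List (String × String))))))) = pvEmptyDay := by
    funext i
    simp [pvEmptyDay, pvSlotsA]
  simp only [hmap]
  have := pvMain days.toNat days 0 attractions le_rfl (by omega)
  simpa using this
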